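-- pv_equiv track=rewrite | github.com/ChaitanyaVardhan/kickstart | 2020/round-d/record_breaker.py | solve
-- ===== SOURCE A (Python) =====
-- def solve(N, S):
--     days = []
--     i = 0
--     while i < len(S):
--         if cond_1(i, S) and cond_2(i, S):
--             days.append(i)
--         i += 1
--
--     return len(days)
--
-- def cond_1(i, S):
--     j = 0
--     while j < i:
--         if S[j] < S[i]:
--             j += 1
--         else:
--             break
--     if j == i:
--         return True
--     else:
--         return False
--
-- def cond_2(i, S):
--     if i == len(S) - 1:
--         return True
--     elif S[i] > S[i+1]:
--         return True
--     else:
--         return False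
-- ===== SOURCE B (Python) =====
-- def solve(N, S):
--     count = 0
--     best = None  # running maximum of all previous days
--     for i, x in enumerate(S):
--         is_record = best is None or x > best
--         beats_next = i == len(S) - 1 or x > S[i + 1]
--         if is_record and beats_next:
--             count += 1
--         if is_record:
--             best = x
--     return count
-- ===== Notes on version B (the rewrite author's own statement) =====
-- stated objective: faster
-- what changed: Replace the O(n^2) per-index rescan of the whole prefix (cond_1's inner while loop) by a single pass that maintains the running prefix maximum and compares each element to it and to its successor.
import Mathlib
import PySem

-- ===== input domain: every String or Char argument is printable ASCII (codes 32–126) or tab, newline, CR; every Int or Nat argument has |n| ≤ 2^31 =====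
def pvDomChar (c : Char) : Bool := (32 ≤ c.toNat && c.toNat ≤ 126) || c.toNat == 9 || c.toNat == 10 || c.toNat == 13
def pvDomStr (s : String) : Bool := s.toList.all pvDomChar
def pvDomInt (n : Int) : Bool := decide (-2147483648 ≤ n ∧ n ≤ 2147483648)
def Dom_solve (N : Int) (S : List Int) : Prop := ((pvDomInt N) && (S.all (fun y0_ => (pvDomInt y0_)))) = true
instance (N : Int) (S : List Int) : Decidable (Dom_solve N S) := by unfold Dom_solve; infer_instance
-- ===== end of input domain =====

-- B replaces A's quadratic prefix rescan by one pass with a running prefix maximum (asymptotically faster).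

-- ===== PORT A =====
-- cond_1's inner 'while j < i' loop: advance while S[j] < S[i], else stop
def c1loop (S : List Int) (i j : Nat) : Nat :=
  if j < i then
    if PySem.List.pyGetD S (j : Int) 0 < PySem.List.pyGetD S (i : Int) 0 then
      c1loop S i (j + 1)
    else j
  else j
termination_by i - j

def cond_1 (i : Nat) (S : List Int) : Bool := c1loop S i 0 == i

def cond_2 (i : Nat) (S : List Int) : Bool :=
  if i == S.length - 1 then true
  else if PySem.List.pyGetD S ((i : Int) + 1) 0 < PySem.List.pyGetD S (i : Int) 0 then true
  else false

-- the 'while i < len(S)' loop accumulating the list 'days'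
def loopA (S : List Int) (i : Nat) (days : List Nat) : List Nat :=
  if i < S.length then
    loopA S (i + 1) (if cond_1 i S && cond_2 i S then days ++ [i] else days)
  else days
termination_by S.length - i

def solve (N : Int) (S : List Int) : Int := ((loopA S 0 []).length : Int)

-- ===== PORT B =====
-- one step of Source B's loop body: state = (count, best); best = running prefix maximum (None before the first element)
def bstep (S : List Int) (st : Int × Option Int) (p : Int × Int) : Int × Option Int :=
  let isRecord : Bool := match st.2 with | none => true | some b => decide (b < p.2)
  let beatsNext : Bool := (p.1 == PySem.List.len S - 1) || decide (PySem.List.pyGetD S (p.1 + 1) 0 < p.2)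
  ((if isRecord && beatsNext then st.1 + 1 else st.1), if isRecord then some p.2 else st.2)

def solve_alt (N : Int) (S : List Int) : Int :=
  ((PySem.List.enumerate S 0).foldl (bstep S) (0, none)).1

-- ===== PRECONDITION & SPEC =====
def Spec_solve (N : Int) (S : List Int) (out : Int) : Prop := out = solve_alt N S
instance (N : Int) (S : List Int) (out : Int) : Decidable (Spec_solve N S out) := by unfold Spec_solve; infer_instance

-- ===== CLAIM (what is proved, stated in full; the proofs are below) =====
def Claim_equal_solve : Prop := ∀ (N : Int) (S : List Int), Dom_solve N S → Spec_solve N S (solve N S)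

-- ===== LEMMAS AND PROOFS =====

-- reference predicate: index k is a "record breaker" day of S
def goodC (S : List Int) (k : Nat) : Bool :=
  decide (∀ j < k, PySem.List.pyGetD S (j : Int) 0 < PySem.List.pyGetD S (k : Int) 0) &&
  (decide ((k : Int) = (S.length : Int) - 1) ||
    decide (PySem.List.pyGetD S ((k : Int) + 1) 0 < PySem.List.pyGetD S (k : Int) 0))

lemma foldl_max_lt_iff (L : List Int) : ∀ (a t : Int), L.foldl max a < t ↔ a < t ∧ ∀ y ∈ L, y < t := by
  induction L with
  | nil => simp
  | cons x L ih =>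
    intro a t
    simp [List.foldl_cons, ih (max a x) t, and_assoc]

-- pmaxL pre: value of B's 'best' after processing the prefix pre
def pmaxL (L : List Int) : Option Int :=
  L.foldl (fun m x => match m with | none => some x | some b => if b < x then some x else some b) none

lemma pmaxL_append_singleton (L : List Int) (x : Int) :
    pmaxL (L ++ [x]) = match pmaxL L with | none => some x | some b => if b < x then some x else some b := by
  simp [pmaxL, List.foldl_append]

lemma foldl_pm_some (L : List Int) : ∀ (b : Int),
    L.foldl (fun m x => match m with | none => some x | some b => if b < x then some x else some b) (some b)
      = some (L.foldl max b) := by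
  induction L with
  | nil => intro b; rfl
  | cons x L ih =>
    intro b
    rcases lt_or_ge b x with h | h
    · simp [List.foldl_cons, h, ih, max_eq_right h.le]
    · simp [List.foldl_cons, not_lt.mpr h, ih, max_eq_left h]

lemma pmaxL_cons (a : Int) (L : List Int) : pmaxL (a :: L) = some (L.foldl max a) := by
  simp [pmaxL, foldl_pm_some]

lemma isRecord_eq (pre : List Int) (x : Int) :
    (match pmaxL pre with | none => true | some b => decide (b < x)) =
      decide (∀ y ∈ pre, y < x) := by
  cases pre with
  | nil => simp [pmaxL]
  | cons a L =>
    rw [pmaxL_cons]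
    simp [foldl_max_lt_iff]

lemma forall_mem_iff_forall_getD (pre : List Int) (x : Int) :
    (∀ y ∈ pre, y < x) ↔ (∀ j < pre.length, pre.getD j 0 < x) := by
  constructor
  · intro h j hj
    rw [List.getD_eq_getElem _ _ hj]
    exact h _ (List.getElem_mem hj)
  · intro h y hy
    obtain ⟨j, hj, rfl⟩ := List.mem_iff_getElem.mp hy
    have := h j hj
    rwa [List.getD_eq_getElem _ _ hj] at this

lemma getD_append_self (pre rest : List Int) (x : Int) :
    (pre ++ x :: rest).getD pre.length 0 = x := by
  induction pre with
  | nil => rfl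
  | cons a pre ih => simp

lemma getD_append_left (pre rest : List Int) (j : Nat) (hj : j < pre.length) :
    (pre ++ rest).getD j 0 = pre.getD j 0 := by
  rw [List.getD_eq_getElem _ _ (by simp; omega), List.getD_eq_getElem _ _ hj,
    List.getElem_append_left hj]

-- A side: characterisation of the inner while loop of cond_1
lemma c1loop_eq_iff (S : List Int) (i : Nat) : ∀ j, j ≤ i →
    (c1loop S i j = i ↔ ∀ k, j ≤ k → k < i →
      PySem.List.pyGetD S (k : Int) 0 < PySem.List.pyGetD S (i : Int) 0) := by
  suffices h : ∀ n j, n = i - j → j ≤ i →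
      (c1loop S i j = i ↔ ∀ k, j ≤ k → k < i →
        PySem.List.pyGetD S (k : Int) 0 < PySem.List.pyGetD S (i : Int) 0) from
    fun j hj => h (i - j) j rfl hj
  intro n
  induction n with
  | zero =>
    intro j hn hj
    have hji : j = i := by omega
    subst hji
    rw [c1loop, if_neg (lt_irrefl _)]
    constructor
    · intro _ k hk1 hk2
      exact absurd hk2 (by omega)
    · intro _
      rfl
  | succ n ih =>
    intro j hn hj
    have hji : j < i := by omega
    rw [c1loop, if_pos hji]
    by_cases hc : PySem.List.pyGetD S (j : Int) 0 < PySem.List.pyGetD S (i : Int) 0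
    · rw [if_pos hc, ih (j + 1) (by omega) (by omega)]
      constructor
      · intro h k hk1 hk2
        rcases Nat.eq_or_lt_of_le hk1 with rfl | hk
        · exact hc
        · exact h k hk hk2
      · intro h k hk1 hk2
        exact h k (by omega) hk2
    · rw [if_neg hc]
      constructor
      · intro h; omega
      · intro h; exact absurd (h j le_rfl hji) hc

lemma cond1_eq (S : List Int) (i : Nat) :
    cond_1 i S = decide (∀ j < i, PySem.List.pyGetD S (j : Int) 0 < PySem.List.pyGetD S (i : Int) 0) := by
  rw [Bool.eq_iff_iff]
  simp only [cond_1, beq_iff_eq, decide_eq_true_eq]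
  rw [c1loop_eq_iff S i 0 (Nat.zero_le i)]
  exact ⟨fun h j hj => h j (Nat.zero_le j) hj, fun h k _ hk => h k hk⟩

lemma cond2_eq (S : List Int) (i : Nat) (hi : i < S.length) :
    cond_2 i S = (decide ((i : Int) = (S.length : Int) - 1) ||
      decide (PySem.List.pyGetD S ((i : Int) + 1) 0 < PySem.List.pyGetD S (i : Int) 0)) := by
  rw [Bool.eq_iff_iff]
  unfold cond_2
  split_ifs with h1 h2
  · simp only [beq_iff_eq] at h1
    simp only [Bool.or_eq_true, decide_eq_true_eq, true_iff]
    exact Or.inl (by omega)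
  · simp only [Bool.or_eq_true, decide_eq_true_eq, true_iff]
    exact Or.inr h2
  · simp only [beq_iff_eq] at h1
    simp only [Bool.or_eq_true, decide_eq_true_eq, false_iff, not_or, h2, not_false_eq_true,
      and_true]
    omega

lemma condA_eq_goodC (S : List Int) (i : Nat) (hi : i < S.length) :
    (cond_1 i S && cond_2 i S) = goodC S i := by
  rw [cond1_eq, cond2_eq S i hi, goodC]

lemma loopA_eq (S : List Int) : ∀ (n i : Nat) (days : List Nat), n = S.length - i →
    loopA S i days = days ++ (List.range' i n).filter (fun k => goodC S k) := by
  intro n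
  induction n with
  | zero =>
    intro i days hn
    rw [loopA]
    have : ¬ i < S.length := by omega
    simp [this]
  | succ n ih =>
    intro i days hn
    have hi : i < S.length := by omega
    rw [loopA, if_pos hi, ih (i + 1) _ (by omega), List.range'_succ, List.filter_cons,
      condA_eq_goodC S i hi]
    by_cases hg : goodC S i = true
    · simp [hg]
    · simp [hg]

-- B side: the fold over the enumerate suffix counts the good indices of the suffix
lemma foldB (S : List Int) : ∀ (suf pre : List Int) (c : Int), S = pre ++ suf →
    ((PySem.List.enumerate suf (pre.length : Int)).foldl (bstep S) (c, pmaxL pre)).1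
      = c + (((List.range' pre.length suf.length).filter (fun k => goodC S k)).length : Int) := by
  intro suf
  induction suf with
  | nil =>
    intro pre c hS
    simp [PySem.List.enumerate_nil]
  | cons x rest ih =>
    intro pre c hS
    rw [PySem.List.enumerate_cons, List.foldl_cons]
    have hgetk : PySem.List.pyGetD S ((pre.length : Nat) : Int) 0 = x := by
      rw [PySem.List.pyGetD_natCast, hS, getD_append_self]
    have hprev : ∀ j < pre.length, PySem.List.pyGetD S ((j : Nat) : Int) 0 = pre.getD j 0 := by
      intro j hj
      rw [PySem.List.pyGetD_natCast, hS, getD_append_left pre _ j hj]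
    have hcond : ((match pmaxL pre with | none => true | some b => decide (b < x)) &&
        (((pre.length : Int) == PySem.List.len S - 1) ||
          decide (PySem.List.pyGetD S ((pre.length : Int) + 1) 0 < x))) = goodC S pre.length := by
      rw [isRecord_eq]
      simp only [goodC]
      rw [hgetk]
      congr 1
      · rw [decide_eq_decide, forall_mem_iff_forall_getD]
        constructor
        · intro h j hj
          rw [hprev j hj]
          exact h j hj
        · intro h j hj
          have := h j hj
          rwa [hprev j hj] at this
    have hm : (if (match pmaxL pre with | none => true | some b => decide (b < x)) then some x
        else pmaxL pre) = pmaxL (pre ++ [x]) := by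
      rw [pmaxL_append_singleton]
      cases hp : pmaxL pre with
      | none => simp
      | some b =>
        by_cases hb : b < x
        · simp [hb]
        · simp [hb]
    have hstep : bstep S (c, pmaxL pre) ((pre.length : Int), x) =
        ((if goodC S pre.length then c + 1 else c), pmaxL (pre ++ [x])) := by
      simp only [bstep, ← hm, ← hcond]
    rw [hstep]
    have hS' : S = (pre ++ [x]) ++ rest := by simp [hS]
    have hlen : ((pre ++ [x]).length : Int) = (pre.length : Int) + 1 := by simp
    have := ih (pre ++ [x]) (if goodC S pre.length then c + 1 else c) hS'
    rw [hlen] at this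
    rw [this]
    simp only [List.length_append, List.length_cons, List.length_nil]
    rw [List.range'_succ, List.filter_cons]
    by_cases hg : goodC S pre.length = true
    · simp [hg]; omega
    · simp [hg]

-- ===== VERDICT (by name: the statement is the Claim_ definition above) =====
theorem solve_spec : Claim_equal_solve := by
  intro N S _
  show solve N S = solve_alt N S
  have hA := loopA_eq S S.length 0 [] (by omega)
  have hB := foldB S S [] 0 (by simp)
  simp only [List.length_nil, Nat.cast_zero, zero_add] at hB
  have hpm : pmaxL ([] : List Int) = none := rfl
  rw [hpm] at hB
  simp [solve, solve_alt, hA, hB]
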